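-- pv_equiv track=rewrite | github.com/mikemol/metacatagory | scripts/makefile_graph.py | parse_make_database
-- ===== SOURCE A (Python) =====
-- import collections
-- from typing import Dict, Iterable, Set
--
-- def parse_make_database(text: str) -> Dict[str, Set[str]]:
--     graph: Dict[str, Set[str]] = collections.defaultdict(set)
--     lines = text.splitlines()
--     i = 0
--     while i < len(lines):
--         raw = lines[i].rstrip()
--         if not raw or raw.startswith("#"):
--             i += 1
--             continue
--
--         # Collect a multi-line rule (lines ending with '\').
--         while raw.endswith("\\"):
--             raw = raw[:-1].rstrip()
--             i += 1
--             if i >= len(lines):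
--                 break
--             raw += " " + lines[i].strip()
--
--         if ":" in raw and not raw.startswith("\t"):
--             target, rest = raw.split(":", 1)
--             target = target.strip()
--             deps = {dep for dep in rest.split() if dep}
--             if target:
--                 graph[target].update(deps)
--         i += 1
--     return graph
-- ===== SOURCE B (Python) =====
-- def _record(graph, raw):
--     if ":" in raw and not raw.startswith("\t"):
--         target, rest = raw.split(":", 1)
--         target = target.strip()
--         if target:
--             graph.setdefault(target, set()).update(rest.split())
--
--
-- def parse_make_database(text):
--     # Single flat pass: a state machine over physical lines. `pending` holds a
--     # partially-folded logical line (backslash already removed); there is no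
--     # inner line-consuming loop.
--     graph = {}
--     pending = None
--     for line in text.splitlines():
--         if pending is None:
--             raw = line.rstrip()
--             if not raw or raw.startswith("#"):
--                 continue
--         else:
--             raw = pending + " " + line.strip()
--         if raw.endswith("\\"):
--             pending = raw[:-1].rstrip()
--         else:
--             _record(graph, raw)
--             pending = None
--     if pending is not None:
--         _record(graph, pending)
--     return graph
-- ===== Notes on version B (the rewrite author's own statement) =====
-- stated objective: alternative
-- what changed: A's nested index-sharing while-loops (an inner loop that consumes extra physical lines per continued rule) are replaced by a single flat left-fold state machine: one pass over the physical lines carrying a `pending` partial-logical-line accumulator, with continuations folded across iterations of the one loop and a final flush, plus a plain dict with setdefault instead of a defaultdict.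
import Mathlib
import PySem

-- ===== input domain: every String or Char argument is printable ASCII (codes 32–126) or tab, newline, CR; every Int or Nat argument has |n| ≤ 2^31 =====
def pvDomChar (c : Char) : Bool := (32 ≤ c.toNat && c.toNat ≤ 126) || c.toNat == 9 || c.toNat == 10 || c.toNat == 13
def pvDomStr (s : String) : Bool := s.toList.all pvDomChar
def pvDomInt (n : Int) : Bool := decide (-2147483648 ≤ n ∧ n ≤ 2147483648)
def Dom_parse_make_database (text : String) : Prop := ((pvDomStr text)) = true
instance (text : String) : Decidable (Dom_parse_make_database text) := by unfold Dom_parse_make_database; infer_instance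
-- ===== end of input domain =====

-- B replaces A's nested index-sharing while-loops by one flat left-fold state
-- machine over the physical lines (a `pending` accumulator folds continuations
-- across iterations; a final flush records a trailing continued line);
-- objective: alternative. Return value only (A returns a defaultdict of sets).

-- ===== PORT A =====
-- A's inner `while raw.endswith("\\")` loop: strips the backslash, rstrips, and
-- consumes further physical lines (break at end of input).
def pvCollectA (raw : List Char) (rest : List String) : List Char × List String :=
  if PySem.Chars.endswith raw ['\\'] then
    let raw2 := PySem.Chars.rstrip raw.dropLast
    match rest with
    | [] => (raw2, [])
    | l :: rest' => pvCollectA (raw2 ++ ' ' :: PySem.Chars.strip l.toList) rest'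
  else (raw, rest)

-- termination lemma for pvLoopA (cited in its decreasing_by)
theorem pvCollectA_snd_le (raw : List Char) (rest : List String) :
    (pvCollectA raw rest).2.length ≤ rest.length := by
  induction rest generalizing raw with
  | nil => unfold pvCollectA; split <;> simp
  | cons l rest' ih =>
      unfold pvCollectA
      split
      · exact le_trans (ih _) (by simp)
      · simp

-- the body of A's `if ":" in raw and not raw.startswith("\t")` block
def pvStepA (d : PySem.Dict String (PySem.Set String)) (raw : List Char) :
    PySem.Dict String (PySem.Set String) :=
  if PySem.Chars.isIn [':'] raw && !PySem.Chars.startswith raw ['\t'] then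
    match PySem.Chars.splitOnMax raw [':'] 1 with
    | t :: r :: _ =>
      let target := PySem.Chars.strip t
      let deps := PySem.Set.ofList
        (((PySem.Chars.split₀ r).filter (fun dep => !dep.isEmpty)).map (fun cs => String.ofList cs))
      if !target.isEmpty then
        d.modify (String.ofList target) PySem.Set.empty (fun s => s.update deps)
      else d
    | _ => d  -- unreachable: split(":", 1) with ":" in raw yields two pieces
  else d

-- A's outer while-loop over the line index
def pvLoopA (d : PySem.Dict String (PySem.Set String)) (ls : List String) :
    PySem.Dict String (PySem.Set String) :=
  match ls with
  | [] => d
  | l :: rest =>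
    let raw := PySem.Chars.rstrip l.toList
    if raw.isEmpty || PySem.Chars.startswith raw ['#'] then pvLoopA d rest
    else
      let p := pvCollectA raw rest
      pvLoopA (pvStepA d p.1) p.2
termination_by ls.length
decreasing_by
  · simp
  · simp only [List.length_cons]
    have := pvCollectA_snd_le (PySem.Chars.rstrip l.toList) rest
    omega

def parse_make_database (text : String) : List (String × List String) :=
  (pvLoopA PySem.Dict.empty (PySem.Str.splitlines text)).items

-- ===== PORT B =====
-- B's _record helper: parse one complete logical line into the graph
def pvRecordB (d : PySem.Dict String (PySem.Set String)) (raw : List Char) :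
    PySem.Dict String (PySem.Set String) :=
  if PySem.Chars.isIn [':'] raw && !PySem.Chars.startswith raw ['\t'] then
    match PySem.Chars.splitOnMax raw [':'] 1 with
    | t :: r :: _ =>
      let target := PySem.Chars.strip t
      if !target.isEmpty then
        let cur := d.getD (String.ofList target) PySem.Set.empty   -- setdefault(target, set())
        d.insert (String.ofList target)
          (cur.update ((PySem.Chars.split₀ r).map (fun cs => String.ofList cs)))
      else d
    | _ => d  -- unreachable under the guard
  else d

-- the shared tail of B's loop body: continue (set pending) or record
def pvContB (d : PySem.Dict String (PySem.Set String)) (raw : List Char) :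
    PySem.Dict String (PySem.Set String) × Option (List Char) :=
  if PySem.Chars.endswith raw ['\\'] then (d, some (PySem.Chars.rstrip raw.dropLast))
  else (pvRecordB d raw, none)

-- one iteration of B's single flat for-loop (state = graph × pending)
def pvStepB (st : PySem.Dict String (PySem.Set String) × Option (List Char)) (line : String) :
    PySem.Dict String (PySem.Set String) × Option (List Char) :=
  match st.2 with
  | none =>
      let raw := PySem.Chars.rstrip line.toList
      if raw.isEmpty || PySem.Chars.startswith raw ['#'] then st
      else pvContB st.1 raw
  | some p => pvContB st.1 (p ++ ' ' :: PySem.Chars.strip line.toList)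

-- B's final flush: `if pending is not None: _record(graph, pending)`
def pvFinishB (st : PySem.Dict String (PySem.Set String) × Option (List Char)) :
    PySem.Dict String (PySem.Set String) :=
  match st.2 with
  | none => st.1
  | some p => pvRecordB st.1 p

def parse_make_database_alt (text : String) : List (String × List String) :=
  (pvFinishB ((PySem.Str.splitlines text).foldl pvStepB (PySem.Dict.empty, none))).items

-- ===== PRECONDITION & SPEC =====
def Spec_parse_make_database (text : String) (out : List (String × List String)) : Prop := out = parse_make_database_alt text
instance (text : String) (out : List (String × List String)) : Decidable (Spec_parse_make_database text out) := by unfold Spec_parse_make_database; infer_instance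

-- ===== CLAIM (what is proved, stated in full; the proofs are below) =====
def Claim_equal_parse_make_database : Prop := ∀ (text : String), Dom_parse_make_database text → Spec_parse_make_database text (parse_make_database text)

-- ===== LEMMAS AND PROOFS =====

-- str.split() (no separator) never produces an empty token
theorem pv_split₀_go_ne_nil (l : List Char) :
    ∀ (cur : List Char) (acc : List (List Char)), (∀ a ∈ acc, a ≠ []) →
      ∀ a ∈ PySem.Chars.split₀.go l cur acc, a ≠ [] := by
  induction l with
  | nil =>
      intro cur acc hacc a ha
      unfold PySem.Chars.split₀.go at ha
      split at ha
      · exact hacc a (by simpa using ha)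
      · rw [List.mem_reverse, List.mem_cons] at ha
        rcases ha with h | h
        · subst h
          simp_all [List.isEmpty_iff]
        · exact hacc a h
  | cons c rest ih =>
      intro cur acc hacc a ha
      unfold PySem.Chars.split₀.go at ha
      split at ha
      · split at ha
        · exact ih _ _ hacc a ha
        · refine ih _ _ ?_ a ha
          intro b hb
          rcases List.mem_cons.mp hb with hb' | hb'
          · subst hb'
            simp_all [List.isEmpty_iff]
          · exact hacc b hb'
      · exact ih _ _ hacc a ha

theorem pv_split₀_filter (r : List Char) :
    (PySem.Chars.split₀ r).filter (fun dep => !dep.isEmpty) = PySem.Chars.split₀ r := by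
  refine List.filter_eq_self.mpr ?_
  intro a ha
  have := pv_split₀_go_ne_nil r [] [] (by simp) a ha
  simpa [List.isEmpty_iff] using this

-- updating with a set built from xs is updating with xs
theorem pv_update_add (s t : PySem.Set String) (x : String) :
    PySem.Set.update s (PySem.Set.add t x) = PySem.Set.add (PySem.Set.update s t) x := by
  by_cases hx : x ∈ t
  · have h1 : PySem.Set.add t x = t := PySem.Set.add_of_mem hx
    have h2 : x ∈ PySem.Set.update s t := (PySem.Set.mem_update s t x).mpr (Or.inr hx)
    rw [h1, PySem.Set.add_of_mem h2]
  · have h1 : PySem.Set.add t x = t ++ [x] := by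
      unfold PySem.Set.add
      simp [List.contains_eq_mem, hx]
    rw [h1, PySem.Set.update_append, PySem.Set.update_cons, PySem.Set.update_nil]

theorem pv_update_update (xs : List String) :
    ∀ (s t : PySem.Set String),
      PySem.Set.update s (PySem.Set.update t xs) = PySem.Set.update (PySem.Set.update s t) xs := by
  induction xs with
  | nil => intro s t; rw [PySem.Set.update_nil, PySem.Set.update_nil]
  | cons x xs ih =>
      intro s t
      rw [PySem.Set.update_cons, PySem.Set.update_cons, ih, pv_update_add]

theorem pv_update_ofList (s : PySem.Set String) (xs : List String) :
    PySem.Set.update s (PySem.Set.ofList xs) = PySem.Set.update s xs := by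
  rw [← PySem.Set.update_empty, pv_update_update]
  have : PySem.Set.update s PySem.Set.empty = s := PySem.Set.update_nil s
  rw [this]

-- A's in-loop rule handling is B's _record
theorem pvStepA_eq_pvRecordB (d : PySem.Dict String (PySem.Set String)) (raw : List Char) :
    pvStepA d raw = pvRecordB d raw := by
  unfold pvStepA pvRecordB
  split
  · split
    · dsimp only
      simp only [pv_split₀_filter, pv_update_ofList, PySem.Dict.modify]
    · rfl
  · rfl

-- key invariant: folding B from a `pvContB d raw` state over the remaining
-- physical lines is recording A's collected logical line and folding from the
-- idle state over A's remaining lines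
theorem pv_fold_cont (rest : List String) : ∀ (raw : List Char) (d : PySem.Dict String (PySem.Set String)),
    pvFinishB (rest.foldl pvStepB (pvContB d raw))
      = pvFinishB ((pvCollectA raw rest).2.foldl pvStepB
          (pvRecordB d (pvCollectA raw rest).1, none)) := by
  induction rest with
  | nil =>
      intro raw d
      unfold pvCollectA pvContB
      split
      · rfl
      · rfl
  | cons l rest' ih =>
      intro raw d
      unfold pvCollectA pvContB
      split
      · dsimp only
        rw [List.foldl_cons]
        have : pvStepB (d, some (PySem.Chars.rstrip raw.dropLast)) l
            = pvContB d (PySem.Chars.rstrip raw.dropLast ++ ' ' :: PySem.Chars.strip l.toList) := rfl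
        rw [this, ih]
      · rfl

-- main invariant: A's fused loop equals B's state-machine fold (plus flush)
theorem pvLoopA_eq_foldB (d : PySem.Dict String (PySem.Set String)) (ls : List String) :
    pvLoopA d ls = pvFinishB (ls.foldl pvStepB (d, none)) := by
  fun_induction pvLoopA d ls with
  | case1 d => rfl
  | case2 d l rest raw hskip ih =>
      rw [List.foldl_cons]
      have : pvStepB (d, none) l = (d, none) := by
        unfold pvStepB
        dsimp only
        rw [if_pos hskip]
      rw [this, ih]
  | case3 d l rest raw hskip p ih =>
      rw [List.foldl_cons]
      have : pvStepB (d, none) l = pvContB d raw := by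
        unfold pvStepB
        dsimp only
        rw [if_neg hskip]
      rw [this, pv_fold_cont, ← pvStepA_eq_pvRecordB, ih]

-- ===== VERDICT (by name: the statement is the Claim_ definition above) =====
theorem parse_make_database_spec : Claim_equal_parse_make_database := by
  intro text _
  unfold Spec_parse_make_database parse_make_database parse_make_database_alt
  rw [pvLoopA_eq_foldB]
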